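-- pv_equiv track=rewrite | github.com/SAFE-Action/SAFE-Action-Website | crawler/validate_emails.py | is_junk_domain
-- ===== SOURCE A (Python) =====
-- JUNK_DOMAINS = {
--     # Sentry error tracking (scraped from JS on campaign sites)
--     'sentry.wixpress.com',
--     'sentry-next.wixpress.com',
--     'o37417.ingest.sentry.io',
--     'ingest.sentry.io',
--     # Wix internal
--     'wixpress.com',
--     # Placeholder/parked
--     'domain.com',
--     'example.com',
--     'domainmarket.com',
--     # Hosting junk
--     'herokuapp.com',
--     'netlify.app',
--     'vercel.app',
--     'amazonaws.com',
--     'googleusercontent.com',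
-- }
--
-- def is_junk_domain(domain):
--     """Check if domain is junk (exact or subdomain match)."""
--     domain = domain.lower()
--     if domain in JUNK_DOMAINS:
--         return True
--     for junk in JUNK_DOMAINS:
--         if domain.endswith('.' + junk):
--             return True
--     return False
-- ===== SOURCE B (Python) =====
-- JUNK_DOMAINS = {
--     'sentry.wixpress.com',
--     'sentry-next.wixpress.com',
--     'o37417.ingest.sentry.io',
--     'ingest.sentry.io',
--     'wixpress.com',
--     'domain.com',
--     'example.com',
--     'domainmarket.com',
--     'herokuapp.com',
--     'netlify.app',
--     'vercel.app',
--     'amazonaws.com',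
--     'googleusercontent.com',
-- }
--
-- def is_junk_domain(domain):
--     """Check if domain is junk (exact or subdomain match)."""
--     d = domain.lower()
--     if d in JUNK_DOMAINS:
--         return True
--     for i, c in enumerate(d):
--         if c == '.' and d[i + 1:] in JUNK_DOMAINS:
--             return True
--     return False
-- ===== Notes on version B (the rewrite author's own statement) =====
-- stated objective: idiomatic
-- what changed: Instead of scanning every JUNK_DOMAINS entry with endswith, B makes one pass over the domain string and tests the suffix after each dot (plus the exact domain) for O(1) set membership, so the junk set is used purely as a lookup table.
import Mathlib
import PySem

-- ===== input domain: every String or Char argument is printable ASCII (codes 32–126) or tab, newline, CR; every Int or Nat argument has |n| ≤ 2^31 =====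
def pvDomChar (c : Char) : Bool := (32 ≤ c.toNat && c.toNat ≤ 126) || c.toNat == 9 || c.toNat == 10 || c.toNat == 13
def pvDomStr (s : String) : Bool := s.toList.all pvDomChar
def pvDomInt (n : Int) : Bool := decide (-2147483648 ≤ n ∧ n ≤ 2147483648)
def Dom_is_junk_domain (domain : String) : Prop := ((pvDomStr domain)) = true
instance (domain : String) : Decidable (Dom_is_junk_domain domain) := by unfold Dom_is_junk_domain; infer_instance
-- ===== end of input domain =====

-- B replaces A's scan of every junk entry with `endswith` by a single pass over the
-- domain's own dot boundaries, testing each dot-boundary suffix for set membership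
-- (objective: idiomatic/alternative; return value only, no side effects).

-- ===== PORT A =====
-- the module constant JUNK_DOMAINS (a Python set literal of distinct strings)
def pvJunk : PySem.Set String := PySem.Set.ofList
  [ "sentry.wixpress.com", "sentry-next.wixpress.com", "o37417.ingest.sentry.io",
    "ingest.sentry.io", "wixpress.com", "domain.com", "example.com",
    "domainmarket.com", "herokuapp.com", "netlify.app", "vercel.app",
    "amazonaws.com", "googleusercontent.com" ]

-- A: lowercase, exact membership test, then a loop over the junk set testing endswith
-- (iteration order over the Python set is not modelled; the result of the loop —
-- "some entry matches" — does not depend on it)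
def is_junk_domain (domain : String) : Bool :=
  let d := PySem.Str.lower domain
  if PySem.Set.contains pvJunk d then true
  else pvJunk.any (fun junk => PySem.Str.endswith d ("." ++ junk))

-- ===== PORT B =====
-- B: lowercase, exact membership test, then one pass over the domain's characters,
-- testing each dot-boundary suffix for set membership
def is_junk_domain_alt (domain : String) : Bool :=
  let d := PySem.Str.lower domain
  if PySem.Set.contains pvJunk d then true
  else (PySem.List.enumerate d.toList).any (fun p =>
    p.2 == '.' && PySem.Set.contains pvJunk (PySem.Str.slice d (some (p.1 + 1)) none))

-- ===== PRECONDITION & SPEC =====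
def Spec_is_junk_domain (domain : String) (out : Bool) : Prop := out = is_junk_domain_alt domain
instance (domain : String) (out : Bool) : Decidable (Spec_is_junk_domain domain out) := by unfold Spec_is_junk_domain; infer_instance

-- ===== CLAIM (what is proved, stated in full; the proofs are below) =====
def Claim_equal_is_junk_domain : Prop := ∀ (domain : String), Dom_is_junk_domain domain → Spec_is_junk_domain domain (is_junk_domain domain)

-- ===== LEMMAS AND PROOFS =====

-- a dot-boundary suffix of l is exactly a `drop (k+1)` after a '.' at position k
theorem pv_dot_suffix_iff (j l : List Char) :
    ('.' :: j) <:+ l ↔ ∃ k : Nat, ∃ h : k < l.length, l[k] = '.' ∧ l.drop (k + 1) = j := by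
  induction l with
  | nil =>
    simp
  | cons c l ih =>
    rw [List.suffix_cons_iff, ih]
    constructor
    · rintro (h | ⟨k, hk, hdot, hdrop⟩)
      · exact ⟨0, by simp, by simpa using (congrArg (fun t => t.headD ' ') h).symm,
          by simpa using (congrArg List.tail h).symm⟩
      · exact ⟨k + 1, by simpa using hk, by simpa using hdot, by simpa using hdrop⟩
    · rintro ⟨k, hk, hdot, hdrop⟩
      cases k with
      | zero =>
        left
        simp at hdot hdrop
        simp [hdot, hdrop]
      | succ k =>
        right
        exact ⟨k, by simpa using hk, by simpa using hdot, by simpa using hdrop⟩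

-- the slice d[k+1:] at list level
theorem pv_slice_toList (d : String) (k : Nat) :
    (PySem.Str.slice d (some ((0:Int) + (k:Int) + 1)) none).toList = d.toList.drop (k + 1) := by
  have h1 : (0 : Int) + (k : Int) + 1 = ((k + 1 : Nat) : Int) := by push_cast; ring
  rw [PySem.Str.toList_slice, h1, PySem.Chars.slice_eq_listSlice, PySem.List.slice_from_natCast]

-- the two "else" branches agree, for any lowered string d
theorem pv_core (d : String) :
    (pvJunk.any (fun junk => PySem.Str.endswith d ("." ++ junk))) =
    ((PySem.List.enumerate d.toList).any (fun p =>
      p.2 == '.' && PySem.Set.contains pvJunk (PySem.Str.slice d (some (p.1 + 1)) none))) := by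
  rw [Bool.eq_iff_iff]
  simp only [List.any_eq_true, PySem.List.mem_enumerate_iff]
  constructor
  · rintro ⟨junk, hmem, hend⟩
    rw [PySem.Str.endswith_eq] at hend
    have hcons : ("." ++ junk).toList = '.' :: junk.toList := by simp
    rw [hcons, PySem.Chars.endswith_iff] at hend
    obtain ⟨k, hk, hdot, hdrop⟩ := (pv_dot_suffix_iff _ _).mp hend
    refine ⟨((0 : Int) + k, d.toList[k]), ⟨k, hk, rfl⟩, ?_⟩
    have hs : PySem.Str.slice d (some ((0:Int) + (k:Int) + 1)) none = junk :=
      String.toList_inj.mp (by rw [pv_slice_toList, hdrop])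
    simp only [hs, hdot, beq_self_eq_true, Bool.true_and]
    exact (PySem.Set.contains_iff _ _).mpr hmem
  · rintro ⟨p, ⟨k, hk, hp⟩, hand⟩
    subst hp
    simp only [Bool.and_eq_true, beq_iff_eq] at hand
    obtain ⟨hdot, hcon⟩ := hand
    refine ⟨_, (PySem.Set.contains_iff _ _).mp hcon, ?_⟩
    rw [PySem.Str.endswith_eq]
    have hcons : ("." ++ PySem.Str.slice d (some ((0:Int) + (k:Int) + 1)) none).toList
        = '.' :: d.toList.drop (k + 1) := by
      simp only [String.toList_append]
      rw [pv_slice_toList]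
      rfl
    rw [hcons, PySem.Chars.endswith_iff]
    exact (pv_dot_suffix_iff _ _).mpr ⟨k, hk, hdot, rfl⟩

-- ===== VERDICT (by name: the statement is the Claim_ definition above) =====
theorem is_junk_domain_spec : Claim_equal_is_junk_domain := by
  intro domain _
  unfold Spec_is_junk_domain is_junk_domain is_junk_domain_alt
  simp only []
  rw [pv_core]
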